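-- pv_equiv track=rewrite | github.com/jjoshua2/arc_agi | unsolved/2025-10-11T04-29-28Z/a8d7556c_best1.py | transform
-- ===== SOURCE A (Python) =====
-- from typing import List
--
-- def transform(grid: List[List[int]]) -> List[List[int]]:
--     if not grid or not grid[0]:
--         return []
--     rows = len(grid)
--     cols = len(grid[0])
--     # Work from the original grid for detection
--     orig = grid
--     # Make a copy for output
--     out = [row[:] for row in orig]
--     # Scan all possible top-left corners of 2x2 subgrids
--     for r in range(rows - 1):
--         for c in range(cols - 1):
--             if orig[r][c] == 0 and orig[r][c+1] == 0 and orig[r+1][c] == 0 and orig[r+1][c+1] == 0: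
--                 out[r][c]     = 2
--                 out[r][c+1]   = 2
--                 out[r+1][c]   = 2
--                 out[r+1][c+1] = 2
--     return out
-- ===== SOURCE B (Python) =====
-- from typing import List
--
-- def transform(grid: List[List[int]]) -> List[List[int]]:
--     if not grid or not grid[0]:
--         return []
--     rows = len(grid)
--     cols = len(grid[0])
--
--     def zero_block(r: int, c: int) -> bool:
--         # is (r, c) the top-left of an in-bounds all-zero 2x2 block?
--         return (0 <= r and r + 1 < rows and 0 <= c and c + 1 < cols
--                 and grid[r][c] == 0 and grid[r][c + 1] == 0
--                 and grid[r + 1][c] == 0 and grid[r + 1][c + 1] == 0)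
--
--     # build the output cell by cell: a cell becomes 2 iff one of the up-to-four
--     # 2x2 windows containing it is entirely zero
--     return [[2 if any(zero_block(r + dr, c + dc)
--                       for dr in (-1, 0) for dc in (-1, 0))
--              else v
--              for c, v in enumerate(row)]
--             for r, row in enumerate(grid)]
-- ===== Notes on version B (the rewrite author's own statement) =====
-- stated objective: alternative
-- what changed: B builds the output cell-by-cell (a cell becomes 2 iff one of the up-to-four 2x2 windows containing it is entirely zero) instead of A's in-place stamping of four cells per detected all-zero block.
-- outside the precondition, e.g. on transform([[1, 2], [3]]): A returns [[1, 2], [3]], B returns [[1, 2], [3]]; on transform([[0, 0], [0]]): A raises IndexError, B raises IndexError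
import Mathlib
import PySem

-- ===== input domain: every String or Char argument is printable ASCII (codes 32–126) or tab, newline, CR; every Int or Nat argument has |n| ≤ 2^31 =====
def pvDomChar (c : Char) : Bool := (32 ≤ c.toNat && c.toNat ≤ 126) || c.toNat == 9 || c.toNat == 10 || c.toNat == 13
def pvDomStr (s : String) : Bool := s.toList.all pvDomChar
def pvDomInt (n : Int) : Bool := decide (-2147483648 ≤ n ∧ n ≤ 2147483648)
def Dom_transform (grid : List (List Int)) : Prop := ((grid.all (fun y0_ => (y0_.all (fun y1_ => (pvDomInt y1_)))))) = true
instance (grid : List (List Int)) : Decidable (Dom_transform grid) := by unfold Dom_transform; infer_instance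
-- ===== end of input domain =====

-- B rebuilds the grid cell-by-cell (a cell becomes 2 iff one of the up-to-four 2x2 windows
-- containing it is all zero) instead of A's stamp-four-cells-per-detected-block mutation: a different decomposition of the same quadratic scan.

-- ===== PORT A =====
-- cell read g[r][c]; exact for in-range indices (the only ones reached under Pre_)
def pvCell (g : List (List Int)) (r c : Nat) : Int := (g.getD r []).getD c 0

-- the four assignments out[r][c]=2 … out[r+1][c+1]=2; List.set is exact for the in-range
-- indices guaranteed by the loop bounds under Pre_
def pvStamp (o : List (List Int)) (r c : Nat) : List (List Int) :=
  o.set r ((o.getD r []).set c 2)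

def pvStamp4 (o : List (List Int)) (r c : Nat) : List (List Int) :=
  pvStamp (pvStamp (pvStamp (pvStamp o r c) r (c+1)) (r+1) c) (r+1) (c+1)

-- A's 2x2 all-zero test at top-left (r,c) (read from the original grid)
def pvBlockA (g : List (List Int)) (r c : Nat) : Bool :=
  pvCell g r c == 0 && pvCell g r (c+1) == 0 && pvCell g (r+1) c == 0 && pvCell g (r+1) (c+1) == 0

def transform (grid : List (List Int)) : List (List Int) :=
  if grid = [] ∨ grid.headD [] = [] then [] else
    let rows := grid.length
    let cols := (grid.headD []).length
    (List.range (rows - 1)).foldl (fun out r =>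
      (List.range (cols - 1)).foldl (fun out c =>
        if pvBlockA grid r c then pvStamp4 out r c else out) out) grid

-- ===== PORT B =====
-- B's zero_block(r,c): bounds guard then the four zero tests, same short-circuit order
def pvZeroBlockB (g : List (List Int)) (rows cols : Nat) (r c : Int) : Bool :=
  decide (0 ≤ r) && decide (r + 1 < (rows : Int)) &&
  decide (0 ≤ c) && decide (c + 1 < (cols : Int)) &&
  pvCell g r.toNat c.toNat == 0 && pvCell g r.toNat (c.toNat + 1) == 0 &&
  pvCell g (r.toNat + 1) c.toNat == 0 && pvCell g (r.toNat + 1) (c.toNat + 1) == 0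

def transform_alt (grid : List (List Int)) : List (List Int) :=
  if grid = [] ∨ grid.headD [] = [] then [] else
    let rows := grid.length
    let cols := (grid.headD []).length
    grid.mapIdx (fun r row => row.mapIdx (fun c v =>
      if ([((-1 : Int), (-1 : Int)), (-1, 0), (0, -1), (0, 0)]).any
           (fun d => pvZeroBlockB grid rows cols ((r : Int) + d.1) ((c : Int) + d.2))
      then 2 else v))

-- ===== PRECONDITION & SPEC =====
-- Pre_ requires every row to be at least as long as the first (trivially satisfied when there
-- is at most one row or column, where no 2x2 window exists): on more ragged grids either
-- implementation can raise IndexError depending on short-circuit order, and ragged grids on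
-- which A happens to return (its copy, or the same stamped copy as B) are excluded with them.
def Pre_transform (grid : List (List Int)) : Prop :=
  grid.length ≤ 1 ∨ (grid.headD []).length ≤ 1 ∨
    ∀ row ∈ grid, (grid.headD []).length ≤ row.length
instance (grid : List (List Int)) : Decidable (Pre_transform grid) := by
  unfold Pre_transform; infer_instance

def pvWitness_transform : List (List Int) := [[0, 0, 1], [0, 0, 3], [4, 5, 6]]

def Spec_transform (grid : List (List Int)) (out : List (List Int)) : Prop := out = transform_alt grid
instance (grid : List (List Int)) (out : List (List Int)) : Decidable (Spec_transform grid out) := by unfold Spec_transform; infer_instance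

-- ===== CLAIM (what is proved, stated in full; the proofs are below) =====
def Claim_equal_transform : Prop := ∀ (grid : List (List Int)), Dom_transform grid → Pre_transform grid → Spec_transform grid (transform grid)

-- ===== LEMMAS AND PROOFS =====

-- does the block with top-left (r,c) cover cell (i,j)?
def pvCovers (r c i j : Nat) : Bool := (r == i || r + 1 == i) && (c == j || c + 1 == j)

theorem length_pvStamp (o : List (List Int)) (r c : Nat) :
    (pvStamp o r c).length = o.length := by
  simp [pvStamp]

theorem rowlen_pvStamp (o : List (List Int)) (r c i : Nat) :
    ((pvStamp o r c).getD i []).length = (o.getD i []).length := by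
  simp only [pvStamp, List.getD_eq_getElem?_getD, List.getElem?_set]
  split_ifs with h1 h2 <;> simp_all

theorem cell_pvStamp (o : List (List Int)) (r c i j : Nat)
    (hr : r < o.length) (hc : c < (o.getD r []).length) :
    pvCell (pvStamp o r c) i j = if i = r ∧ j = c then 2 else pvCell o i j := by
  simp only [pvCell, pvStamp, List.getD_eq_getElem?_getD, List.getElem?_set] at *
  rcases eq_or_ne i r with h | h
  · subst h
    simp only [hr, if_pos]
    rcases eq_or_ne j c with h2 | h2
    · subst h2; simp [hc]
    · simp [h2, Ne.symm h2]
  · simp [Ne.symm h, h]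

theorem length_pvStamp4 (o : List (List Int)) (r c : Nat) :
    (pvStamp4 o r c).length = o.length := by
  simp [pvStamp4, length_pvStamp]

theorem rowlen_pvStamp4 (o : List (List Int)) (r c i : Nat) :
    ((pvStamp4 o r c).getD i []).length = (o.getD i []).length := by
  simp only [pvStamp4, rowlen_pvStamp]

theorem cell_pvStamp4 (o : List (List Int)) (r c i j : Nat)
    (hr : r + 1 < o.length) (hc : c + 1 < (o.getD r []).length)
    (hc' : c + 1 < (o.getD (r+1) []).length) :
    pvCell (pvStamp4 o r c) i j = if pvCovers r c i j then 2 else pvCell o i j := by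
  unfold pvStamp4
  rw [cell_pvStamp _ (r+1) (c+1) i j
        (by simp only [length_pvStamp]; omega)
        (by simp only [rowlen_pvStamp]; omega),
      cell_pvStamp _ (r+1) c i j
        (by simp only [length_pvStamp]; omega)
        (by simp only [rowlen_pvStamp]; omega),
      cell_pvStamp _ r (c+1) i j
        (by simp only [length_pvStamp]; omega)
        (by simp only [rowlen_pvStamp]; omega),
      cell_pvStamp _ r c i j (by omega) (by omega)]
  simp only [pvCovers, Bool.and_eq_true, Bool.or_eq_true, beq_iff_eq]
  split_ifs <;> first | rfl | omega

-- the loop body as a function of a (r,c) pair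
def pvStepA (g : List (List Int)) (o : List (List Int)) (x : Nat × Nat) : List (List Int) :=
  if pvBlockA g x.1 x.2 then pvStamp4 o x.1 x.2 else o

theorem length_foldl_stepA (g : List (List Int)) (L : List (Nat × Nat)) (o : List (List Int)) :
    (L.foldl (pvStepA g) o).length = o.length := by
  induction L generalizing o with
  | nil => rfl
  | cons x L ih =>
      simp only [List.foldl_cons, ih]
      unfold pvStepA; split
      · exact length_pvStamp4 o x.1 x.2
      · rfl

theorem rowlen_foldl_stepA (g : List (List Int)) (L : List (Nat × Nat)) (o : List (List Int)) (i : Nat) :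
    ((L.foldl (pvStepA g) o).getD i []).length = (o.getD i []).length := by
  induction L generalizing o with
  | nil => rfl
  | cons x L ih =>
      simp only [List.foldl_cons, ih]
      unfold pvStepA; split
      · exact rowlen_pvStamp4 o x.1 x.2 i
      · rfl

theorem cell_foldl_stepA (g : List (List Int)) (L : List (Nat × Nat)) (o : List (List Int))
    (hb : ∀ x ∈ L, x.1 + 1 < o.length ∧ x.2 + 1 < (o.getD x.1 []).length ∧
            x.2 + 1 < (o.getD (x.1 + 1) []).length) (i j : Nat) :
    pvCell (L.foldl (pvStepA g) o) i j
      = if L.any (fun x => pvBlockA g x.1 x.2 && pvCovers x.1 x.2 i j) then 2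
        else pvCell o i j := by
  induction L generalizing o with
  | nil => simp
  | cons x L ih =>
      have hlen : (pvStepA g o x).length = o.length := by
        unfold pvStepA; split
        · exact length_pvStamp4 o x.1 x.2
        · rfl
      have hrow : ∀ k, ((pvStepA g o x).getD k []).length = (o.getD k []).length := by
        intro k; unfold pvStepA; split
        · exact rowlen_pvStamp4 o x.1 x.2 k
        · rfl
      have hb' : ∀ y ∈ L, y.1 + 1 < (pvStepA g o x).length ∧
          y.2 + 1 < ((pvStepA g o x).getD y.1 []).length ∧
          y.2 + 1 < ((pvStepA g o x).getD (y.1 + 1) []).length := by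
        intro y hy
        rw [hlen, hrow, hrow]
        exact hb y (List.mem_cons_of_mem _ hy)
      have hx := hb x List.mem_cons_self
      rw [List.foldl_cons, ih (pvStepA g o x) hb']
      unfold pvStepA
      by_cases hblk : pvBlockA g x.1 x.2
      · rw [if_pos hblk, cell_pvStamp4 _ _ _ _ _ hx.1 hx.2.1 hx.2.2]
        simp only [List.any_cons, hblk, Bool.true_and]
        by_cases hcov : pvCovers x.1 x.2 i j <;>
          by_cases hany : L.any (fun x => pvBlockA g x.1 x.2 && pvCovers x.1 x.2 i j) = true <;>
            simp [hcov, hany]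
      · rw [if_neg hblk]
        rw [Bool.not_eq_true] at hblk
        simp only [List.any_cons, hblk, Bool.false_and, Bool.false_or]

-- double loop over ranges = single loop over the list of pairs
theorem foldl_flatMap' {α β γ : Type} (l : List α) (g : α → List β) (f : γ → β → γ) (o : γ) :
    ((l.flatMap g).foldl f o) = l.foldl (fun o a => (g a).foldl f o) o := by
  induction l generalizing o with
  | nil => rfl
  | cons a l ih => simp [List.flatMap_cons, List.foldl_append, ih]

def pvPairs (m n : Nat) : List (Nat × Nat) :=
  (List.range m).flatMap (fun r => (List.range n).map (fun c => (r, c)))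

theorem foldl_range_range (g : List (List Int)) (m n : Nat) (o : List (List Int)) :
    (List.range m).foldl (fun out r =>
      (List.range n).foldl (fun out c =>
        if pvBlockA g r c then pvStamp4 out r c else out) out) o
    = (pvPairs m n).foldl (pvStepA g) o := by
  rw [pvPairs, foldl_flatMap']
  congr 1
  funext o r
  rw [List.foldl_map]
  rfl

theorem mem_pvPairs (m n : Nat) (x : Nat × Nat) :
    x ∈ pvPairs m n ↔ x.1 < m ∧ x.2 < n := by
  cases x with
  | mk r c => simp [pvPairs, List.mem_flatMap, List.mem_map, List.mem_range]

-- an in-bounds all-zero 2x2 window with top-left (r,c), as a plain proposition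
def pvWin (g : List (List Int)) (rows cols r c : Nat) : Prop :=
  r + 1 < rows ∧ c + 1 < cols ∧ pvCell g r c = 0 ∧ pvCell g r (c+1) = 0 ∧
    pvCell g (r+1) c = 0 ∧ pvCell g (r+1) (c+1) = 0

theorem zeroBlockB_iff (g : List (List Int)) (rows cols : Nat) (R C : Int) :
    pvZeroBlockB g rows cols R C = true ↔
      0 ≤ R ∧ 0 ≤ C ∧ pvWin g rows cols R.toNat C.toNat := by
  simp only [pvZeroBlockB, pvWin, Bool.and_eq_true, decide_eq_true_eq, beq_iff_eq]
  constructor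
  · rintro ⟨⟨⟨⟨⟨⟨⟨h1, h2⟩, h3⟩, h4⟩, h5⟩, h6⟩, h7⟩, h8⟩
    exact ⟨h1, h3, by omega, by omega, h5, h6, h7, h8⟩
  · rintro ⟨h1, h3, h2, h4, h5, h6, h7, h8⟩
    exact ⟨⟨⟨⟨⟨⟨⟨h1, by omega⟩, h3⟩, by omega⟩, h5⟩, h6⟩, h7⟩, h8⟩

theorem anyA_iff (g : List (List Int)) (rows cols i j : Nat) :
    (pvPairs (rows - 1) (cols - 1)).any
        (fun x => pvBlockA g x.1 x.2 && pvCovers x.1 x.2 i j) = true ↔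
      ∃ r c : Nat, pvWin g rows cols r c ∧ (r = i ∨ r + 1 = i) ∧ (c = j ∨ c + 1 = j) := by
  rw [List.any_eq_true]
  constructor
  · rintro ⟨⟨r, c⟩, hx, hp⟩
    rw [mem_pvPairs] at hx
    simp only [pvBlockA, pvCovers, Bool.and_eq_true, Bool.or_eq_true, beq_iff_eq] at hp
    exact ⟨r, c, ⟨by omega, by omega, hp.1.1.1.1, hp.1.1.1.2, hp.1.1.2, hp.1.2⟩,
      by omega, by omega⟩
  · rintro ⟨r, c, ⟨w1, w2, w3, w4, w5, w6⟩, hri, hcj⟩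
    refine ⟨(r, c), (mem_pvPairs _ _ _).mpr ⟨by omega, by omega⟩, ?_⟩
    simp only [pvBlockA, pvCovers, Bool.and_eq_true, Bool.or_eq_true, beq_iff_eq]
    exact ⟨⟨⟨⟨w3, w4⟩, w5⟩, w6⟩, by omega, by omega⟩

theorem anyB_iff (g : List (List Int)) (rows cols i j : Nat) :
    (([((-1 : Int), (-1 : Int)), (-1, 0), (0, -1), (0, 0)]).any
        (fun d => pvZeroBlockB g rows cols ((i : Int) + d.1) ((j : Int) + d.2))) = true ↔
      ∃ r c : Nat, pvWin g rows cols r c ∧ (r = i ∨ r + 1 = i) ∧ (c = j ∨ c + 1 = j) := by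
  simp only [List.any_cons, List.any_nil, Bool.or_eq_true, Bool.or_false, zeroBlockB_iff]
  constructor
  · rintro (⟨h1, h2, hw⟩ | ⟨h1, h2, hw⟩ | ⟨h1, h2, hw⟩ | ⟨h1, h2, hw⟩) <;>
      exact ⟨_, _, hw, by omega, by omega⟩
  · rintro ⟨r, c, hw, hri | hri, hcj | hcj⟩
    · refine Or.inr (Or.inr (Or.inr ⟨by omega, by omega, ?_⟩))
      have e1 : ((i : Int) + 0).toNat = r := by omega
      have e2 : ((j : Int) + 0).toNat = c := by omega
      rw [e1, e2]; exact hw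
    · refine Or.inr (Or.inr (Or.inl ⟨by omega, by omega, ?_⟩))
      have e1 : ((i : Int) + 0).toNat = r := by omega
      have e2 : ((j : Int) + (-1)).toNat = c := by omega
      rw [e1, e2]; exact hw
    · refine Or.inr (Or.inl ⟨by omega, by omega, ?_⟩)
      have e1 : ((i : Int) + (-1)).toNat = r := by omega
      have e2 : ((j : Int) + 0).toNat = c := by omega
      rw [e1, e2]; exact hw
    · refine Or.inl ⟨by omega, by omega, ?_⟩
      have e1 : ((i : Int) + (-1)).toNat = r := by omega
      have e2 : ((j : Int) + (-1)).toNat = c := by omega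
      rw [e1, e2]; exact hw

theorem any_windows_eq (g : List (List Int)) (rows cols i j : Nat) :
    (pvPairs (rows - 1) (cols - 1)).any
        (fun x => pvBlockA g x.1 x.2 && pvCovers x.1 x.2 i j)
    = ([((-1 : Int), (-1 : Int)), (-1, 0), (0, -1), (0, 0)]).any
        (fun d => pvZeroBlockB g rows cols ((i : Int) + d.1) ((j : Int) + d.2)) :=
  Bool.eq_iff_iff.mpr ((anyA_iff g rows cols i j).trans (anyB_iff g rows cols i j).symm)

-- ===== VERDICT (by name: the statement is the Claim_ definition above) =====
theorem transform_spec : Claim_equal_transform := by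
  unfold Claim_equal_transform
  intro grid _ hpre
  unfold Spec_transform transform transform_alt
  by_cases hg : grid = [] ∨ grid.headD [] = []
  · rw [if_pos hg, if_pos hg]
  · rw [if_neg hg, if_neg hg]
    rw [not_or] at hg
    have hrows : 1 ≤ grid.length := List.length_pos_iff.mpr hg.1
    have hcols : 1 ≤ (grid.headD []).length := List.length_pos_iff.mpr hg.2
    rw [foldl_range_range]
    have hb : ∀ x ∈ pvPairs (grid.length - 1) ((grid.headD []).length - 1),
        x.1 + 1 < grid.length ∧ x.2 + 1 < (grid.getD x.1 []).length ∧
          x.2 + 1 < (grid.getD (x.1 + 1) []).length := by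
      intro x hx
      rw [mem_pvPairs] at hx
      rcases hpre with h | h | h
      · omega
      · omega
      · have h1 : (grid.headD []).length ≤ (grid.getD x.1 []).length := by
          apply h
          rw [List.getD_eq_getElem _ _ (by omega : x.1 < grid.length)]
          exact List.getElem_mem _
        have h2 : (grid.headD []).length ≤ (grid.getD (x.1 + 1) []).length := by
          apply h
          rw [List.getD_eq_getElem _ _ (by omega : x.1 + 1 < grid.length)]
          exact List.getElem_mem _
        omega
    apply List.ext_getElem
    · rw [length_foldl_stepA, List.length_mapIdx]
    · intro i h1 h2
      have hi : i < grid.length := by rwa [length_foldl_stepA] at h1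
      have hrowlen : (List.foldl (pvStepA grid) grid
            (pvPairs (grid.length - 1) ((grid.headD []).length - 1)))[i].length
          = grid[i].length := by
        rw [← List.getD_eq_getElem _ ([] : List Int) h1, rowlen_foldl_stepA,
          List.getD_eq_getElem _ _ hi]
      apply List.ext_getElem
      · rw [hrowlen]
        simp [List.getElem_mapIdx]
      · intro j hj1 hj2
        have hj : j < (grid.getD i []).length := by
          rw [List.getD_eq_getElem _ _ hi, ← hrowlen]; exact hj1
        have lhs_cell : (List.foldl (pvStepA grid) grid
              (pvPairs (grid.length - 1) ((grid.headD []).length - 1)))[i][j]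
            = pvCell (List.foldl (pvStepA grid) grid
                (pvPairs (grid.length - 1) ((grid.headD []).length - 1))) i j := by
          rw [pvCell, List.getD_eq_getElem _ ([] : List Int) h1,
            List.getD_eq_getElem _ (0 : Int) hj1]
        rw [lhs_cell, cell_foldl_stepA grid _ grid hb i j]
        simp only [List.getElem_mapIdx]
        rw [← any_windows_eq]
        have : pvCell grid i j = grid[i][j] := by
          rw [pvCell, List.getD_eq_getElem _ ([] : List Int) hi,
            List.getD_eq_getElem _ (0 : Int) (by rwa [List.getD_eq_getElem _ _ hi] at hj)]
        rw [this]
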